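-- pv_equiv track=rewrite | github.com/henrik-olvr/TE-CPD | sort.py | calcMinRun
-- ===== SOURCE A (Python) =====
-- MIN_MERGE = 32
--
-- def calcMinRun(n):
--     trocas = comparacoes = 0
--     """Returns the minimum length of a
--     run from 23 - 64 so that
--     the len(array)/minrun is less than or
--     equal to a power of 2.
--
--     e.g. 1=>1, ..., 63=>63, 64=>32, 65=>33,
--     ..., 127=>64, 128=>32, ...
--     """
--     r = 0
--     while n >= MIN_MERGE:
--         comparacoes = comparacoes + 1
--         r |= n & 1
--         n >>= 1
--     #return n + r
--     return {'retorno' : (n + r), 'trocas': trocas, 'comparacoes': comparacoes}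
-- ===== SOURCE B (Python) =====
-- MIN_MERGE = 32
--
-- def calcMinRun(n):
--     # Closed form: no loop. For n < MIN_MERGE the loop body never runs.
--     if n < MIN_MERGE:
--         return {'retorno': n, 'trocas': 0, 'comparacoes': 0}
--     k = n.bit_length() - 5          # number of halvings until n < 32
--     r = 1 if n & ((1 << k) - 1) else 0
--     return {'retorno': (n >> k) + r, 'trocas': 0, 'comparacoes': k}
-- ===== Notes on version B (the rewrite author's own statement) =====
-- stated objective: alternative
-- what changed: Replaces A's halving while-loop with a closed-form computation from bit_length: the number of halvings is derived directly, retorno is the shifted value plus an indicator of any shed low bit, comparacoes is that halving count.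
import Mathlib
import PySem

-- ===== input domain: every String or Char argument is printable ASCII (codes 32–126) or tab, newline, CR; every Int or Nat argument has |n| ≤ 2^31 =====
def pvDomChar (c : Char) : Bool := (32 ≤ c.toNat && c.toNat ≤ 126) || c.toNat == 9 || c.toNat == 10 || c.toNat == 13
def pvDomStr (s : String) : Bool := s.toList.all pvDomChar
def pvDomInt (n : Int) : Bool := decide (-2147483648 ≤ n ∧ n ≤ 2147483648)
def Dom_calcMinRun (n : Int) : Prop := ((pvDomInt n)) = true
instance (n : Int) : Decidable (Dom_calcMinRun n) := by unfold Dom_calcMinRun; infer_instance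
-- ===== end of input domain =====

-- B replaces A's halving while-loop by a closed-form bit_length computation (alternative algorithm, no loop).

-- ===== PORT A =====
-- the while-loop of A, state (n, r, comparacoes); trocas stays 0 throughout
def calcMinRunLoop (n r comparacoes : Int) : List (String × Int) :=
  if 32 ≤ n then
    calcMinRunLoop (n >>> (1:Nat)) (PySem.Int.bor r (PySem.Int.band n 1)) (comparacoes + 1)
  else
    [("retorno", n + r), ("trocas", 0), ("comparacoes", comparacoes)]
termination_by n.toNat
decreasing_by rw [Int.shiftRight_eq_div_pow]; omega

def calcMinRun (n : Int) : List (String × Int) :=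
  calcMinRunLoop n 0 0

-- ===== PORT B =====
def calcMinRun_alt (n : Int) : List (String × Int) :=
  if n < 32 then [("retorno", n), ("trocas", 0), ("comparacoes", 0)]
  else
    let k : Nat := PySem.Int.bitLength n - 5
    let r : Int := if PySem.Int.band n ((1 <<< k) - 1) ≠ 0 then 1 else 0
    [("retorno", (n >>> k) + r), ("trocas", 0), ("comparacoes", (k : Int))]

-- ===== PRECONDITION & SPEC =====
def Spec_calcMinRun (n : Int) (out : List (String × Int)) : Prop := out = calcMinRun_alt n
instance (n : Int) (out : List (String × Int)) : Decidable (Spec_calcMinRun n out) := by unfold Spec_calcMinRun; infer_instance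

-- ===== CLAIM (what is proved, stated in full; the proofs are below) =====
def Claim_equal_calcMinRun : Prop := ∀ (n : Int), Dom_calcMinRun n → Spec_calcMinRun n (calcMinRun n)

-- ===== LEMMAS AND PROOFS =====

-- number of halvings the loop performs starting from a Nat value m
def pvK (m : Nat) : Nat := if 32 ≤ m then PySem.Int.bitLength (m : Int) - 5 else 0

lemma pvBitLength_ge (m : Nat) (h : 32 ≤ m) : 6 ≤ PySem.Int.bitLength (m : Int) := by
  by_contra hlt
  have := PySem.Int.lt_two_pow_bitLength (m : Int)
  have hm : m < 2 ^ PySem.Int.bitLength (m : Int) := by simpa using this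
  have : 2 ^ PySem.Int.bitLength (m : Int) ≤ 2 ^ 5 := Nat.pow_le_pow_right (by omega) (by omega)
  omega

lemma pvK_step (m : Nat) (h : 32 ≤ m) : pvK m = pvK (m / 2) + 1 := by
  have hb : PySem.Int.bitLength (m : Int) = PySem.Int.bitLength ((m / 2 : Nat) : Int) + 1 :=
    PySem.Int.bitLength_natCast (by omega)
  by_cases h2 : 32 ≤ m / 2
  · have := pvBitLength_ge (m / 2) h2
    simp only [pvK, if_pos h, if_pos h2]
    omega
  · have hlt : m < 64 := by omega
    have h6 : PySem.Int.bitLength (m : Int) = 6 := by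
      have hge := pvBitLength_ge m h
      have := PySem.Int.lt_two_pow_bitLength (m : Int)
      have hm : m < 2 ^ PySem.Int.bitLength (m : Int) := by simpa using this
      have h7 : PySem.Int.bitLength (m : Int) ≤ 6 := by
        by_contra hc
        have hne : (m : Int) ≠ 0 := by omega
        have := PySem.Int.two_pow_bitLength_le (m : Int) hne
        have hle : 2 ^ (PySem.Int.bitLength (m : Int) - 1) ≤ m := by simpa using this
        have : 2 ^ 6 ≤ 2 ^ (PySem.Int.bitLength (m : Int) - 1) :=
          Nat.pow_le_pow_right (by omega) (by omega)
        omega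
      omega
    simp only [pvK, if_pos h, if_neg h2, h6]

-- the loop, on a Nat value and an accumulator r ∈ {0,1}, computes the closed form
lemma pvLoop_eq (m : Nat) : ∀ r c : Int, (r = 0 ∨ r = 1) →
    calcMinRunLoop (m : Int) r c =
      [("retorno", ((m >>> pvK m : Nat) : Int) +
          (if r = 1 ∨ m % 2 ^ pvK m ≠ 0 then (1:Int) else 0)),
       ("trocas", 0), ("comparacoes", c + (pvK m : Int))] := by
  induction m using Nat.strong_induction_on with
  | _ m ih =>
    intro r c hr
    by_cases h : 32 ≤ m
    · have hK := pvK_step m h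
      rw [calcMinRunLoop]
      rw [if_pos (by exact_mod_cast h)]
      have hsh : ((m : Int) >>> (1:Nat)) = ((m / 2 : Nat) : Int) := by
        rw [← Int.natCast_shiftRight]
        norm_num [Nat.shiftRight_succ]
      have hband : PySem.Int.band (m : Int) 1 = ((m % 2 : Nat) : Int) := by
        have : ((1:Int)) = ((1:Nat) : Int) := rfl
        rw [this, PySem.Int.band_natCast]
        norm_num [Nat.and_one_is_mod]
      set r' : Int := PySem.Int.bor r (PySem.Int.band (m : Int) 1) with hr'
      have hr'val : r' = if r = 1 ∨ m % 2 = 1 then (1:Int) else 0 := by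
        rw [hr', hband]
        rcases hr with h0 | h0 <;> subst h0 <;>
          rcases Nat.mod_two_eq_zero_or_one m with he | he <;> rw [he] <;> decide
      have hr01 : r' = 0 ∨ r' = 1 := by rw [hr'val]; split_ifs <;> simp
      rw [hsh, ih (m / 2) (by omega) r' (c + 1) hr01]
      have hkpos : pvK m = pvK (m / 2) + 1 := hK
      have hshift : (m / 2) >>> pvK (m / 2) = m >>> pvK m := by
        rw [hkpos, Nat.shiftRight_eq_div_pow, Nat.shiftRight_eq_div_pow,
          Nat.div_div_eq_div_mul, pow_succ, Nat.mul_comm]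
      have hmod : (r' = 1 ∨ m / 2 % 2 ^ pvK (m / 2) ≠ 0) ↔ (r = 1 ∨ m % 2 ^ pvK m ≠ 0) := by
        have hdecomp : m % 2 ^ pvK m = m % 2 + 2 * (m / 2 % 2 ^ pvK (m / 2)) := by
          rw [hkpos, pow_succ, Nat.mul_comm, Nat.mod_mul]
        rw [hr'val]
        constructor
        · rintro (h1 | h2)
          · split_ifs at h1 with hc
            · rcases hc with hc | hc
              · exact Or.inl hc
              · right; omega
            · exact absurd h1 (by norm_num)
          · right; omega
        · rintro (h1 | h2)
          · left; simp [h1]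
          · by_cases hc : r = 1 ∨ m % 2 = 1
            · left; simp [hc]
            · right
              simp only [not_or] at hc
              omega
      have hcomp : c + 1 + (pvK (m / 2) : Int) = c + (pvK m : Int) := by
        rw [hkpos]; push_cast; ring
      rw [hshift, hcomp]
      congr 2
      congr 1
      by_cases hh : r = 1 ∨ m % 2 ^ pvK m ≠ 0
      · rw [if_pos hh, if_pos (hmod.mpr hh)]
      · rw [if_neg hh, if_neg (fun hx => hh (hmod.mp hx))]
    · rw [calcMinRunLoop]
      rw [if_neg (by exact_mod_cast h)]
      have hK0 : pvK m = 0 := by simp [pvK, h]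
      rcases hr with h0 | h0 <;> simp [hK0, h0, pow_zero, Nat.mod_one]

theorem pv_main (n : Int) : calcMinRun n = calcMinRun_alt n := by
  unfold calcMinRun calcMinRun_alt
  by_cases h : n < 32
  · rw [calcMinRunLoop, if_neg (by omega), if_pos h]
    norm_num
  · rw [if_neg h]
    have hm : n = ((n.toNat : Nat) : Int) := by omega
    set m : Nat := n.toNat with hmdef
    have hm32 : 32 ≤ m := by omega
    rw [hm, pvLoop_eq m 0 0 (Or.inl rfl)]
    have hKeq : pvK m = PySem.Int.bitLength ((m : Nat) : Int) - 5 := by simp [pvK, hm32]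
    have hband : PySem.Int.band ((m : Nat) : Int) ((((1:Nat) <<< pvK m : Nat) : Int) - 1)
        = ((m % 2 ^ pvK m : Nat) : Int) := by
      have h1 : (((1:Nat) <<< pvK m : Nat) : Int) - 1 = ((2 ^ pvK m - 1 : Nat) : Int) := by
        rw [Nat.one_shiftLeft]
        have : 1 ≤ 2 ^ pvK m := Nat.one_le_two_pow
        push_cast [this]
        ring
      rw [h1, PySem.Int.band_natCast, Nat.and_two_pow_sub_one_eq_mod]
    simp only [← hKeq]
    have hshift : ((m : Nat) : Int) >>> pvK m = ((m >>> pvK m : Nat) : Int) :=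
      (Int.natCast_shiftRight m (pvK m)).symm
    rw [hshift]
    by_cases hz : m % 2 ^ pvK m = 0
    · rw [if_neg (by simp [hz]), if_neg (by rw [hband, hz]; simp)]
      norm_num
    · rw [if_pos (Or.inr hz), if_pos (by rw [hband]; exact_mod_cast hz)]
      norm_num

-- ===== VERDICT (by name: the statement is the Claim_ definition above) =====
theorem calcMinRun_spec : Claim_equal_calcMinRun := by
  intro n _
  unfold Spec_calcMinRun
  exact pv_main n
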